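-- pv_equiv track=rewrite | github.com/shanjiaming/lean-pl-fix | decompose_solver.py | convert_theorem_to_example_cmd
-- ===== SOURCE A (Python) =====
-- def convert_theorem_to_example_cmd(input_str: str) -> str:
--     """
--     Converts a string containing a Lean theorem into a command string
--     by replacing the first 'theorem' with 'example := by have'
--     and indenting the subsequent lines of the original theorem.
--     """
--     lines = input_str.split('\n')
--     output_lines = []
--     theorem_found = False
--     indent_prefix = "  " # Two spaces for indentation
--
--     for i, line in enumerate(lines):
--         if not theorem_found:
--             theorem_keyword_index = line.find("theorem")
--             if theorem_keyword_index != -1: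
--                 theorem_found = True
--                 # Part of the line before "theorem"
--                 before_theorem = line[:theorem_keyword_index]
--                 # Part of the line from "theorem" onwards
--                 after_theorem_keyword = line[theorem_keyword_index + len("theorem"):]
--
--                 output_lines.append(f"{before_theorem}example := by")
--                 # Add the rest of the original theorem line as the first part of the 'have', indented
--                 output_lines.append(f"{indent_prefix}have{after_theorem_keyword}")
--             else:
--                 output_lines.append(line) # Line before theorem definition
--         else:
--             # Lines after the theorem line started, or subsequent lines of a multi-line theorem definition
--             output_lines.append(f"{indent_prefix}{line}")
--
--     return '\n'.join(output_lines)
-- ===== SOURCE B (Python) =====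
-- def convert_theorem_to_example_cmd(input_str: str) -> str:
--     """
--     Converts a string containing a Lean theorem into a command string
--     by replacing the first 'theorem' with 'example := by have'
--     and indenting the subsequent lines of the original theorem.
--     """
--     idx = input_str.find("theorem")
--     if idx == -1:
--         return input_str
--     before = input_str[:idx]
--     first, *remaining = input_str[idx + len("theorem"):].split('\n')
--     return '\n'.join([before + "example := by", "  have" + first]
--                      + ["  " + l for l in remaining])
-- ===== Notes on version B (the rewrite author's own statement) =====
-- stated objective: simpler
-- what changed: A's per-line state-machine loop (split first, then fold over lines tracking a theorem_found flag) is replaced by a single find on the whole string followed by locate-and-partition: slice before the match, slice after it, split that tail once and indent it.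
import Mathlib
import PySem

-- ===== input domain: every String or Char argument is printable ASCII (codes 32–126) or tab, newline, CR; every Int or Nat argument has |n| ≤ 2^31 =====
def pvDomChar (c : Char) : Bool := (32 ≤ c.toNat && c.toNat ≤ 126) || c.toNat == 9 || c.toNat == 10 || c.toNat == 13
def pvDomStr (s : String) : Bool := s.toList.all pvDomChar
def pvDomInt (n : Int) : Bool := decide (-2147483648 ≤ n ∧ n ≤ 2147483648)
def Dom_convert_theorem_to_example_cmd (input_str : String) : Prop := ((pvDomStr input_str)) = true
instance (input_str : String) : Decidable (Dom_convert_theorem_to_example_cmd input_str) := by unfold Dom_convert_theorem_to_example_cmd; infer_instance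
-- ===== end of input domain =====

-- B replaces A's per-line state-machine loop by one find on the whole string followed by
-- locate-and-partition (slice before / slice after, split the tail once); objective: simpler.
-- Both ports work on the char list (PySem.Chars, per the prelude's convention) and wrap with String.ofList.

-- ===== PORT A =====
-- literal pieces of both programs
def pvThm : List Char := ['t','h','e','o','r','e','m']
def pvEx : List Char := ['e','x','a','m','p','l','e',' ',':','=',' ','b','y']
def pvInd : List Char := [' ',' ']
def pvHave : List Char := ['h','a','v','e']

-- A's loop body: state = (output_lines, theorem_found)
def pvStepA (st : List (List Char) × Bool) (line : List Char) : List (List Char) × Bool :=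
  if st.2 = false then
    let idx := PySem.Chars.find line pvThm
    if idx ≠ -1 then
      (st.1 ++ [PySem.Chars.slice line none (some idx) ++ pvEx,
                pvInd ++ pvHave ++ PySem.Chars.slice line (some (idx + 7)) none], true)
    else
      (st.1 ++ [line], false)
  else
    (st.1 ++ [pvInd ++ line], st.2)

def pvCoreA (s : List Char) : List Char :=
  let lines := (PySem.Chars.split? s ['\n']).getD []
  let r := lines.foldl pvStepA ([], false)
  PySem.Chars.join ['\n'] r.1

def convert_theorem_to_example_cmd (input_str : String) : String :=
  String.ofList (pvCoreA input_str.toList)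

-- ===== PORT B =====
def pvCoreB (s : List Char) : List Char :=
  let idx := PySem.Chars.find s pvThm
  if idx = -1 then s
  else
    let before := PySem.Chars.slice s none (some idx)
    match (PySem.Chars.split? (PySem.Chars.slice s (some (idx + 7)) none) ['\n']).getD [] with
    | [] => []   -- unreachable: split never returns an empty list
    | first :: remaining =>
        PySem.Chars.join ['\n']
          ([before ++ pvEx, pvInd ++ pvHave ++ first] ++ remaining.map (fun l => pvInd ++ l))

def convert_theorem_to_example_cmd_alt (input_str : String) : String :=
  String.ofList (pvCoreB input_str.toList)

-- ===== PRECONDITION & SPEC =====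
def Spec_convert_theorem_to_example_cmd (input_str : String) (out : String) : Prop := out = convert_theorem_to_example_cmd_alt input_str
instance (input_str : String) (out : String) : Decidable (Spec_convert_theorem_to_example_cmd input_str out) := by unfold Spec_convert_theorem_to_example_cmd; infer_instance

-- ===== CLAIM (what is proved, stated in full; the proofs are below) =====
def Claim_equal_convert_theorem_to_example_cmd : Prop := ∀ (input_str : String), Dom_convert_theorem_to_example_cmd input_str → Spec_convert_theorem_to_example_cmd input_str (convert_theorem_to_example_cmd input_str)

-- ===== LEMMAS AND PROOFS =====

-- proof-only reference splitter on a single separator char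
def pvSplitCh (c : Char) : List Char → List (List Char)
  | [] => [[]]
  | a :: t =>
      if a = c then [] :: pvSplitCh c t
      else
        match pvSplitCh c t with
        | [] => [[a]]
        | x :: xs => (a :: x) :: xs

theorem pvSplitCh_ne_nil (c : Char) (s : List Char) : pvSplitCh c s ≠ [] := by
  cases s with
  | nil => simp [pvSplitCh]
  | cons a t =>
    simp only [pvSplitCh]
    split
    · simp
    · split <;> simp

def pvConsHead (p : List Char) : List (List Char) → List (List Char)
  | [] => [p]
  | x :: xs => (p ++ x) :: xs

theorem pvGo_eq (c : Char) (fuel : Nat) (l cur : List Char) (acc : List (List Char))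
    (h : l.length ≤ fuel) :
    PySem.Chars.splitOn.go [c] fuel l cur acc =
      acc.reverse ++ pvConsHead cur.reverse (pvSplitCh c l) := by
  induction fuel generalizing l cur acc with
  | zero =>
    have : l = [] := by simpa using h
    subst this
    simp [PySem.Chars.splitOn.go, pvSplitCh, pvConsHead]
  | succ fuel ih =>
    cases l with
    | nil => simp [PySem.Chars.splitOn.go, pvSplitCh, pvConsHead]
    | cons a rest =>
      rw [PySem.Chars.splitOn.go]
      by_cases hac : a = c
      · subst hac
        have hp : List.isPrefixOf [a] (a :: rest) = true := by simp [List.isPrefixOf]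
        rw [if_pos hp]
        simp only [List.length_cons] at h
        rw [ih _ _ _ (by simpa using h)]
        cases hs : pvSplitCh a rest with
        | nil => exact absurd hs (pvSplitCh_ne_nil a rest)
        | cons x xs => simp [pvSplitCh, pvConsHead, hs]
      · have hp : List.isPrefixOf [c] (a :: rest) = false := by
          simp [List.isPrefixOf]; exact fun h' => absurd h'.symm hac
        rw [if_neg (by simp [hp])]
        simp only [List.length_cons] at h
        rw [ih _ _ _ (by omega)]
        simp only [pvSplitCh, if_neg hac]
        cases hs : pvSplitCh c rest with
        | nil => exact absurd hs (pvSplitCh_ne_nil c rest)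
        | cons x xs => simp [pvConsHead]

theorem pvSplitOn_eq_splitCh (c : Char) (s : List Char) :
    PySem.Chars.splitOn s [c] = pvSplitCh c s := by
  rw [PySem.Chars.splitOn, pvGo_eq c _ _ _ _ (by omega)]
  cases hs : pvSplitCh c s with
  | nil => exact absurd hs (pvSplitCh_ne_nil c s)
  | cons x xs => simp [pvConsHead]

theorem pvLines (s : List Char) :
    (PySem.Chars.split? s ['\n']).getD [] = pvSplitCh '\n' s := by
  simp [PySem.Chars.split?, pvSplitOn_eq_splitCh]

theorem pvSplitCh_of_not_mem {c : Char} {s : List Char} (h : c ∉ s) :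
    pvSplitCh c s = [s] := by
  induction s with
  | nil => simp [pvSplitCh]
  | cons a t ih =>
    simp only [List.mem_cons, not_or] at h
    rw [pvSplitCh, if_neg (Ne.symm h.1), ih h.2]

theorem pvSplitCh_append {c : Char} {l t : List Char} (h : c ∉ l) :
    pvSplitCh c (l ++ c :: t) = l :: pvSplitCh c t := by
  induction l with
  | nil => simp [pvSplitCh]
  | cons a l' ih =>
    simp only [List.mem_cons, not_or] at h
    rw [List.cons_append, pvSplitCh, if_neg (Ne.symm h.1), ih h.2]

-- prefix of an append cut at a char the needle does not contain stays in the left part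
theorem pvPrefix_append_cons {sub A t : List Char} {c : Char} (hc : c ∉ sub)
    (h : sub <+: A ++ c :: t) : sub <+: A := by
  by_cases hlen : sub.length ≤ A.length
  · have he := List.prefix_iff_eq_take.mp h
    rw [List.take_append_of_le_length hlen] at he
    exact he ▸ List.take_prefix _ _
  · exfalso
    rw [not_le] at hlen
    obtain ⟨r, hr⟩ := h
    have h1 : (sub ++ r)[A.length]? = sub[A.length]? := List.getElem?_append_left hlen
    have h2 : (A ++ c :: t)[A.length]? = some c := by
      rw [List.getElem?_append_right (Nat.le_refl _)]
      simp
    rw [hr, h2] at h1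
    exact hc (List.mem_of_getElem? h1.symm)

theorem pvInfix_of_prefix_drop {sub s : List Char} {j : Nat} (h : sub <+: s.drop j) :
    sub <:+: s :=
  List.infix_iff_prefix_suffix.mpr ⟨s.drop j, h, List.drop_suffix j s⟩

-- find characterisation: a first occurrence pins the value
theorem pvFind_eq_of_first {s sub : List Char} {j : Nat}
    (h1 : sub <+: s.drop j) (h2 : ∀ i < j, ¬ sub <+: s.drop i) :
    PySem.Chars.find s sub = (j : Int) := by
  have hnn : 0 ≤ PySem.Chars.find s sub :=
    (PySem.Chars.find_nonneg_iff s sub).mpr (pvInfix_of_prefix_drop h1)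
  obtain ⟨hs1, hs2⟩ := PySem.Chars.find_spec hnn
  rcases Nat.lt_trichotomy (PySem.Chars.find s sub).toNat j with hlt | heq | hgt
  · exact absurd hs1 (h2 _ hlt)
  · omega
  · exact absurd h1 (hs2 j hgt)

theorem pvNotMem_nl : '\n' ∉ pvThm := by decide

theorem pvDrop_app (l t : List Char) (c : Char) (j : Nat) :
    (l ++ c :: t).drop (l.length + 1 + j) = t.drop j := by
  rw [Nat.add_assoc, List.drop_length_add_append, Nat.add_comm, List.drop_succ_cons]

theorem pvFind_append_left {l t : List Char} {j : Nat}
    (hfind : PySem.Chars.find l pvThm = (j : Int)) :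
    PySem.Chars.find (l ++ '\n' :: t) pvThm = (j : Int) := by
  have hnn : 0 ≤ PySem.Chars.find l pvThm := by rw [hfind]; positivity
  obtain ⟨hs1, hs2⟩ := PySem.Chars.find_spec hnn
  rw [hfind] at hs1 hs2
  simp only [Int.toNat_natCast] at hs1 hs2
  have hjl : j ≤ l.length := by
    have := PySem.Chars.find_le_length l pvThm
    omega
  apply pvFind_eq_of_first
  · rw [List.drop_append_of_le_length hjl]
    exact hs1.trans (List.prefix_append _ _)
  · intro i hij hpre
    rw [List.drop_append_of_le_length (by omega)] at hpre
    exact hs2 i hij (pvPrefix_append_cons pvNotMem_nl hpre)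

theorem pvFind_append_right {l t : List Char} (hl : ¬ pvThm <:+: l) {j : Nat}
    (hfind : PySem.Chars.find t pvThm = (j : Int)) :
    PySem.Chars.find (l ++ '\n' :: t) pvThm = ((l.length + 1 + j : Nat) : Int) := by
  have hnn : 0 ≤ PySem.Chars.find t pvThm := by rw [hfind]; positivity
  obtain ⟨hs1, hs2⟩ := PySem.Chars.find_spec hnn
  rw [hfind] at hs1 hs2
  simp only [Int.toNat_natCast] at hs1 hs2
  apply pvFind_eq_of_first
  · rw [pvDrop_app l t '\n' j]; exact hs1
  · intro i hij hpre
    by_cases hil : i ≤ l.length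
    · rw [List.drop_append_of_le_length hil] at hpre
      exact hl (pvInfix_of_prefix_drop (pvPrefix_append_cons pvNotMem_nl hpre))
    · have hi : i = l.length + 1 + (i - l.length - 1) := by omega
      rw [hi] at hpre
      rw [pvDrop_app l t '\n' (i - l.length - 1)] at hpre
      exact hs2 _ (by omega) hpre

theorem pvFind_append_none {l t : List Char} (hl : ¬ pvThm <:+: l)
    (ht : PySem.Chars.find t pvThm = -1) :
    PySem.Chars.find (l ++ '\n' :: t) pvThm = -1 := by
  rw [PySem.Chars.find_eq_neg_one_iff] at ht ⊢
  intro hinf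
  obtain ⟨j, hpre⟩ := (PySem.Chars.exists_prefix_drop_iff_isIn pvThm _).mpr
    ((PySem.Chars.isIn_iff_infix _ _).mpr hinf)
  by_cases hjl : j ≤ l.length
  · rw [List.drop_append_of_le_length hjl] at hpre
    exact hl (pvInfix_of_prefix_drop (pvPrefix_append_cons pvNotMem_nl hpre))
  · have hj : j = l.length + 1 + (j - l.length - 1) := by omega
    rw [hj] at hpre
    rw [pvDrop_app l t '\n' (j - l.length - 1)] at hpre
    exact ht (pvInfix_of_prefix_drop hpre)

-- fold shapes of A's loop
theorem pvFold_true (lines : List (List Char)) (out : List (List Char)) :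
    lines.foldl pvStepA (out, true) = (out ++ lines.map (fun l => pvInd ++ l), true) := by
  induction lines generalizing out with
  | nil => simp
  | cons a t ih =>
    rw [List.foldl_cons]
    have : pvStepA (out, true) a = (out ++ [pvInd ++ a], true) := by simp [pvStepA]
    rw [this, ih]
    simp

theorem pvFold_acc (lines : List (List Char)) (out : List (List Char)) :
    lines.foldl pvStepA (out, false) =
      (out ++ (lines.foldl pvStepA ([], false)).1, (lines.foldl pvStepA ([], false)).2) := by
  induction lines generalizing out with
  | nil => simp
  | cons a t ih =>
    rw [List.foldl_cons, List.foldl_cons]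
    by_cases h : PySem.Chars.find a pvThm = -1
    · have h1 : pvStepA (out, false) a = (out ++ [a], false) := by simp [pvStepA, h]
      have h2 : pvStepA (([] : List (List Char)), false) a = ([a], false) := by simp [pvStepA, h]
      rw [h1, h2, ih (out ++ [a]), ih [a]]
      simp
    · have h1 : pvStepA (out, false) a =
          (out ++ [PySem.Chars.slice a none (some (PySem.Chars.find a pvThm)) ++ pvEx,
                   pvInd ++ pvHave ++ PySem.Chars.slice a (some (PySem.Chars.find a pvThm + 7)) none], true) := by
        simp [pvStepA, h]
      have h2 : pvStepA (([] : List (List Char)), false) a =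
          ([PySem.Chars.slice a none (some (PySem.Chars.find a pvThm)) ++ pvEx,
            pvInd ++ pvHave ++ PySem.Chars.slice a (some (PySem.Chars.find a pvThm + 7)) none], true) := by
        simp [pvStepA, h]
      rw [h1, h2, pvFold_true, pvFold_true]
      simp

theorem pvFold_ne_nil (lines : List (List Char)) (hne : lines ≠ []) (out : List (List Char)) (b : Bool) :
    (lines.foldl pvStepA (out, b)).1 ≠ [] := by
  induction lines generalizing out b with
  | nil => exact absurd rfl hne
  | cons a t ih =>
    rw [List.foldl_cons]
    have hstep : ∃ K b', K ≠ [] ∧ pvStepA (out, b) a = (out ++ K, b') := by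
      by_cases hb : b = false
      · subst hb
        by_cases h : PySem.Chars.find a pvThm = -1
        · exact ⟨[a], false, by simp, by simp [pvStepA, h]⟩
        · exact ⟨[PySem.Chars.slice a none (some (PySem.Chars.find a pvThm)) ++ pvEx,
                   pvInd ++ pvHave ++ PySem.Chars.slice a (some (PySem.Chars.find a pvThm + 7)) none],
                  true, by simp, by simp [pvStepA, h]⟩
      · have hb' : b = true := by cases b <;> simp_all
        subst hb'
        exact ⟨[pvInd ++ a], true, by simp, by simp [pvStepA]⟩
    obtain ⟨K, b', hK, hstep⟩ := hstep
    rw [hstep]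
    by_cases ht : t = []
    · subst ht; simp [hK]
    · exact ih ht (out ++ K) b'

-- join over a nonempty-tail cons
theorem pvJoin_cons {x : List Char} {ys : List (List Char)} (h : ys ≠ []) :
    PySem.Chars.join ['\n'] (x :: ys) = x ++ '\n' :: PySem.Chars.join ['\n'] ys := by
  cases ys with
  | nil => exact absurd rfl h
  | cons y ys' => rw [PySem.Chars.join_cons_cons]; simp

-- the recursion law shared by both cores on a theorem-free first line
theorem pvCoreA_skip {l t : List Char} (hl : ¬ pvThm <:+: l) (hnl : '\n' ∉ l) :
    pvCoreA (l ++ '\n' :: t) = l ++ '\n' :: pvCoreA t := by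
  have hfl : PySem.Chars.find l pvThm = -1 := (PySem.Chars.find_eq_neg_one_iff l pvThm).mpr hl
  simp only [pvCoreA, pvLines, pvSplitCh_append hnl, List.foldl_cons]
  have hstep : pvStepA (([] : List (List Char)), false) l = ([l], false) := by
    simp [pvStepA, hfl]
  rw [hstep, pvFold_acc]
  exact pvJoin_cons (pvFold_ne_nil _ (pvSplitCh_ne_nil '\n' t) [] false)

theorem pvCoreB_skip {l t : List Char} (hl : ¬ pvThm <:+: l) (_hnl : '\n' ∉ l) :
    pvCoreB (l ++ '\n' :: t) = l ++ '\n' :: pvCoreB t := by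
  by_cases ht : PySem.Chars.find t pvThm = -1
  · have hs : PySem.Chars.find (l ++ '\n' :: t) pvThm = -1 := pvFind_append_none hl ht
    simp [pvCoreB, hs, ht]
  · have hnn : 0 ≤ PySem.Chars.find t pvThm := by
      have := PySem.Chars.neg_one_le_find t pvThm
      omega
    set j := (PySem.Chars.find t pvThm).toNat with hj
    have hfind : PySem.Chars.find t pvThm = (j : Int) := (Int.toNat_of_nonneg hnn).symm
    have hs : PySem.Chars.find (l ++ '\n' :: t) pvThm = ((l.length + 1 + j : Nat) : Int) :=
      pvFind_append_right hl hfind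
    have hsne : ¬ (((l.length + 1 + j : Nat) : Int) = -1) := by omega
    have htne : ¬ (((j : Nat) : Int) = -1) := by omega
    simp only [pvCoreB, hs, hfind, if_neg hsne, if_neg htne]
    have hb : PySem.Chars.slice (l ++ '\n' :: t) none (some ((l.length + 1 + j : Nat) : Int)) =
        l ++ '\n' :: t.take j := by
      rw [PySem.Chars.slice_eq_listSlice, PySem.List.slice_to_natCast]
      rw [Nat.add_assoc, List.take_length_add_append, Nat.add_comm, List.take_succ_cons]
    have hr : PySem.Chars.slice (l ++ '\n' :: t) (some (((l.length + 1 + j : Nat) : Int) + 7)) none =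
        t.drop (j + 7) := by
      rw [PySem.Chars.slice_eq_listSlice]
      have : ((l.length + 1 + j : Nat) : Int) + 7 = ((l.length + 1 + (j + 7) : Nat) : Int) := by
        push_cast; ring
      rw [this, PySem.List.slice_from_natCast, pvDrop_app]
    have hrt : PySem.Chars.slice t (some (((j : Nat) : Int) + 7)) none = t.drop (j + 7) := by
      rw [PySem.Chars.slice_eq_listSlice]
      have : ((j : Nat) : Int) + 7 = ((j + 7 : Nat) : Int) := by push_cast; ring
      rw [this, PySem.List.slice_from_natCast]
    have hbt : PySem.Chars.slice t none (some ((j : Nat) : Int)) = t.take j := by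
      rw [PySem.Chars.slice_eq_listSlice, PySem.List.slice_to_natCast]
    rw [hb, hr, hrt, hbt]
    cases hsp : (PySem.Chars.split? (t.drop (j + 7)) ['\n']).getD [] with
    | nil =>
      rw [pvLines] at hsp
      exact absurd hsp (pvSplitCh_ne_nil _ _)
    | cons first remaining =>
      simp only [List.cons_append, List.nil_append]
      rw [PySem.Chars.join_cons_cons, PySem.Chars.join_cons_cons]
      simp

-- a single line (no newline in s): both cores agree
theorem pvCore_single {s : List Char} (hnl : '\n' ∉ s) : pvCoreA s = pvCoreB s := by
  by_cases hf : PySem.Chars.find s pvThm = -1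
  · simp only [pvCoreA, pvCoreB, pvLines, pvSplitCh_of_not_mem hnl, List.foldl_cons,
      List.foldl_nil, hf]
    have hstep : pvStepA (([] : List (List Char)), false) s = ([s], false) := by
      simp [pvStepA, hf]
    rw [hstep]
    exact PySem.Chars.join_singleton _ _
  · have hnn : 0 ≤ PySem.Chars.find s pvThm := by
      have := PySem.Chars.neg_one_le_find s pvThm
      omega
    set j := (PySem.Chars.find s pvThm).toNat with hj
    have hfind : PySem.Chars.find s pvThm = (j : Int) := (Int.toNat_of_nonneg hnn).symm
    have hrest : PySem.Chars.slice s (some (((j : Nat) : Int) + 7)) none = s.drop (j + 7) := by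
      rw [PySem.Chars.slice_eq_listSlice]
      have : ((j : Nat) : Int) + 7 = ((j + 7 : Nat) : Int) := by push_cast; ring
      rw [this, PySem.List.slice_from_natCast]
    have hnld : '\n' ∉ s.drop (j + 7) := fun hm => hnl (List.mem_of_mem_drop hm)
    have hfne : ¬ (((j : Nat) : Int) = -1) := by omega
    simp only [pvCoreA, pvCoreB, pvLines, pvSplitCh_of_not_mem hnl, List.foldl_cons,
      List.foldl_nil, hfind, if_neg hfne]
    have hstep : pvStepA (([] : List (List Char)), false) s =
        ([PySem.Chars.slice s none (some ((j : Nat) : Int)) ++ pvEx,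
          pvInd ++ pvHave ++ PySem.Chars.slice s (some (((j : Nat) : Int) + 7)) none], true) := by
      simp [pvStepA, hfind]
    rw [hstep, hrest, pvSplitCh_of_not_mem hnld]
    simp

-- the first line contains "theorem": both cores agree (no recursion needed)
theorem pvCore_found {l t : List Char} (hl : pvThm <:+: l) (hnl : '\n' ∉ l) :
    pvCoreA (l ++ '\n' :: t) = pvCoreB (l ++ '\n' :: t) := by
  have hnn : 0 ≤ PySem.Chars.find l pvThm := (PySem.Chars.find_nonneg_iff l pvThm).mpr hl
  set j := (PySem.Chars.find l pvThm).toNat with hj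
  have hfind : PySem.Chars.find l pvThm = (j : Int) := (Int.toNat_of_nonneg hnn).symm
  have hfne : PySem.Chars.find l pvThm ≠ -1 := by rw [hfind]; omega
  obtain ⟨hs1, _⟩ := PySem.Chars.find_spec hnn
  rw [hfind] at hs1
  simp only [Int.toNat_natCast] at hs1
  have hlen7 : j + 7 ≤ l.length := by
    have h1 := hs1.length_le
    have h2 : (l.drop j).length = l.length - j := List.length_drop ..
    have h3 : j ≤ l.length := by
      have := PySem.Chars.find_le_length l pvThm
      omega
    simp [pvThm] at h1
    omega
  have hsfind : PySem.Chars.find (l ++ '\n' :: t) pvThm = (j : Int) := pvFind_append_left hfind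
    -- A side
  have hjne : ¬ (((j : Nat) : Int) = -1) := by omega
  simp only [pvCoreA, pvCoreB, pvLines, pvSplitCh_append hnl, List.foldl_cons, hsfind,
    if_neg hjne]
  have hstep : pvStepA (([] : List (List Char)), false) l =
      ([PySem.Chars.slice l none (some ((j : Nat) : Int)) ++ pvEx,
        pvInd ++ pvHave ++ PySem.Chars.slice l (some (((j : Nat) : Int) + 7)) none], true) := by
    simp [pvStepA, hfind]
  rw [hstep, pvFold_true]
  -- B side slices
  have hb : PySem.Chars.slice (l ++ '\n' :: t) none (some ((j : Nat) : Int)) = l.take j := by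
    rw [PySem.Chars.slice_eq_listSlice, PySem.List.slice_to_natCast,
      List.take_append_of_le_length (by omega)]
  have hbl : PySem.Chars.slice l none (some ((j : Nat) : Int)) = l.take j := by
    rw [PySem.Chars.slice_eq_listSlice, PySem.List.slice_to_natCast]
  have hr : PySem.Chars.slice (l ++ '\n' :: t) (some (((j : Nat) : Int) + 7)) none =
      l.drop (j + 7) ++ '\n' :: t := by
    rw [PySem.Chars.slice_eq_listSlice]
    have : ((j : Nat) : Int) + 7 = ((j + 7 : Nat) : Int) := by push_cast; ring
    rw [this, PySem.List.slice_from_natCast, List.drop_append_of_le_length hlen7]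
  have hrl : PySem.Chars.slice l (some (((j : Nat) : Int) + 7)) none = l.drop (j + 7) := by
    rw [PySem.Chars.slice_eq_listSlice]
    have : ((j : Nat) : Int) + 7 = ((j + 7 : Nat) : Int) := by push_cast; ring
    rw [this, PySem.List.slice_from_natCast]
  have hnld : '\n' ∉ l.drop (j + 7) := fun hm => hnl (List.mem_of_mem_drop hm)
  rw [hb, hbl, hr, hrl, pvSplitCh_append hnld]

-- decomposition of a string containing a newline
theorem pvMem_split {s : List Char} (h : '\n' ∈ s) :
    ∃ l t, s = l ++ '\n' :: t ∧ '\n' ∉ l := by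
  induction s with
  | nil => simp at h
  | cons a t ih =>
    by_cases ha : a = '\n'
    · exact ⟨[], t, by simp [ha], by simp⟩
    · have hm : '\n' ∈ t := by
        rcases List.mem_cons.mp h with h' | h'
        · exact absurd (Eq.symm h') ha
        · exact h'
      obtain ⟨l', t', hst, hnl⟩ := ih hm
      exact ⟨a :: l', t', by simp [hst],
        by simp only [List.mem_cons, not_or]; exact ⟨fun h' => ha (Eq.symm h'), hnl⟩⟩

theorem pvCore_eq_aux (n : Nat) : ∀ s : List Char, s.length ≤ n → pvCoreA s = pvCoreB s := by
  induction n with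
  | zero =>
    intro s hs
    have : s = [] := by simpa using hs
    subst this
    exact pvCore_single (by simp)
  | succ n ih =>
    intro s hs
    by_cases hm : '\n' ∈ s
    · obtain ⟨l, t, hst, hnl⟩ := pvMem_split hm
      subst hst
      by_cases hl : pvThm <:+: l
      · exact pvCore_found hl hnl
      · rw [pvCoreA_skip hl hnl, pvCoreB_skip hl hnl,
          ih t (by simp at hs; omega)]
    · exact pvCore_single hm

theorem pvCore_eq (s : List Char) : pvCoreA s = pvCoreB s :=
  pvCore_eq_aux s.length s (Nat.le_refl _)

-- ===== VERDICT (by name: the statement is the Claim_ definition above) =====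
theorem convert_theorem_to_example_cmd_spec : Claim_equal_convert_theorem_to_example_cmd := by
  intro s _
  unfold Spec_convert_theorem_to_example_cmd convert_theorem_to_example_cmd convert_theorem_to_example_cmd_alt
  rw [pvCore_eq]
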